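-- pv_equiv track=rewrite | github.com/compgeog/choropleth-tradeoffs | util/pareto_ranking.py | pareto_ranking_old
-- ===== SOURCE A (Python) =====
-- def is_better(v1, v2, minimize = True):
--     """v1 dominiates (is better) v2 if v1 < v2 for minimizing"""
--     if minimize:
--         return v1 < v2
--     else:
--         return v1 > v2
--
-- def is_dominated(objs, ix, ranks, curr_rank, minimize=True): # pop stores the objs
--     ov1 = objs[ix]
--     for i in range(len(objs)):
--         if i==ix:
--             continue
--         a_rank = ranks[i]
--         if a_rank and a_rank < curr_rank:
--             continue
--         ov2 = objs[i]
--         k1, k2, k3 = 0, 0, 0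
--         for j in range(len(objs[0])):
--             if is_better(ov1[j], ov2[j], minimize): # ov1[j] < ov2[j]:
--                 k1 += 1
--             elif ov1[j] == ov2[j]:
--                 k2 += 1
--             else:
--                 k3 += 1
--         if k1==0 and k3>0:
--             return True
--     return False
--
-- def pareto_ranking_old(objs):
--     ranks = [-1 for i in range(len(objs))]
--     curr_rank = 0
--     remain = len(objs)
--     while remain>0:
--         curr_rank += 1
--         for i in range(len(objs)):
--             if ranks[i] > 0:
--                 continue
--             if not is_dominated(objs, i, ranks, curr_rank):
--                 ranks[i] = curr_rank
--                 remain -= 1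
--     return ranks
-- ===== SOURCE B (Python) =====
-- def pareto_ranking_old(objs):
--     # Same greedy index-order Pareto ranking, but the pairwise dominance
--     # matrix is precomputed once and each pass only checks the indices
--     # assigned in the current pass.
--     n = len(objs)
--     d = len(objs[0]) if objs else 0
--     dom = [[all(q[j] <= p[j] for j in range(d)) and any(q[j] < p[j] for j in range(d))
--             for q in objs] for p in objs]
--     ranks = [-1] * n
--     rank = 0
--     while -1 in ranks:
--         rank += 1
--         current = []
--         for i in range(n):
--             if ranks[i] == -1 and not any(dom[i][k] for k in current):
--                 ranks[i] = rank
--                 current.append(i)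
--     return ranks
-- ===== Notes on version B (the rewrite author's own statement) =====
-- stated objective: faster
-- what changed: B precomputes the full pairwise dominance matrix once and, in each greedy pass, tests a candidate only against the explicit list of indices assigned in that pass, replacing A's per-pass rescans of all objective vectors and rank bookkeeping with matrix lookups.
import Mathlib
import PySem

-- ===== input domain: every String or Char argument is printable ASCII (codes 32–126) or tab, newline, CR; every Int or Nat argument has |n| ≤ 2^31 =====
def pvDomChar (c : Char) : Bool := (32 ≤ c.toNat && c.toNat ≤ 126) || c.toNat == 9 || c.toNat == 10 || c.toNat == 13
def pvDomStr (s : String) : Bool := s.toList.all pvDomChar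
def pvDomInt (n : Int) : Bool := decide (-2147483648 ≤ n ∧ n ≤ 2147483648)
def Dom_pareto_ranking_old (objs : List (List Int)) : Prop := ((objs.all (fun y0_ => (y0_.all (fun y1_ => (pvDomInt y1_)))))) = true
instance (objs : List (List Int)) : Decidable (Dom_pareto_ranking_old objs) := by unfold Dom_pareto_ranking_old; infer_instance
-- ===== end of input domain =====

-- B replaces A's per-pass rescans of all objective vectors by a precomputed pairwise
-- dominance matrix plus an explicit list of indices assigned in the current pass
-- (same greedy index-order ranking; the per-pass objective rescans are hoisted out of the rank loop).


-- ===== PORT A =====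
def is_better (v1 v2 : Int) (minimize : Bool) : Bool :=
  if minimize then decide (v1 < v2) else decide (v1 > v2)

-- the inner j-loop of is_dominated: the three counters k1, k2, k3
def kCounts (objs : List (List Int)) (ov1 ov2 : List Int) (minimize : Bool) : Int × Int × Int :=
  (List.range (objs.getD 0 []).length).foldl
    (fun k j =>
      if is_better (ov1.getD j 0) (ov2.getD j 0) minimize then (k.1 + 1, k.2.1, k.2.2)
      else if ov1.getD j 0 = ov2.getD j 0 then (k.1, k.2.1 + 1, k.2.2)
      else (k.1, k.2.1, k.2.2 + 1))
    (0, 0, 0)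

-- the i-loop with `continue`s and an early `return True` is the corresponding `any`
def is_dominated (objs : List (List Int)) (ix : Nat) (ranks : List Int) (curr_rank : Int) (minimize : Bool) : Bool :=
  let ov1 := objs.getD ix []
  (List.range objs.length).any (fun i =>
    if i = ix then false
    else
      let a_rank := ranks.getD i 0
      if a_rank ≠ 0 ∧ a_rank < curr_rank then false
      else
        let ov2 := objs.getD i []
        let k := kCounts objs ov1 ov2 minimize
        decide (k.1 = 0 ∧ k.2.2 > 0))

-- one iteration of the while body: the `for i in range(len(objs))` loop over (ranks, remain)
def passA (objs : List (List Int)) (curr_rank : Int) (st : List Int × Int) : List Int × Int :=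
  (List.range objs.length).foldl
    (fun s i =>
      if s.1.getD i 0 > 0 then s
      else if is_dominated objs i s.1 curr_rank true then s
      else (s.1.set i curr_rank, s.2 - 1))
    st

-- the `while remain > 0` loop; fuel objs.length bounds the passes (each pass ranks ≥ 1 element)
def loopA (objs : List (List Int)) : List Int → Int → Int → Nat → List Int
  | ranks, _, _, 0 => ranks
  | ranks, curr_rank, remain, fuel + 1 =>
    if remain > 0 then
      let s := passA objs (curr_rank + 1) (ranks, remain)
      loopA objs s.1 (curr_rank + 1) s.2 fuel
    else ranks

def pareto_ranking_old (objs : List (List Int)) : List Int :=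
  loopA objs (List.replicate objs.length (-1)) 0 (objs.length : Int) objs.length

-- ===== PORT B =====
-- dom entry for rows p, q: "q dominates p" over the first d coordinates
def pv_dominates (d : Nat) (p q : List Int) : Bool :=
  ((List.range d).all fun j => decide (q.getD j 0 ≤ p.getD j 0)) &&
  ((List.range d).any fun j => decide (q.getD j 0 < p.getD j 0))

def pv_domMatrix (objs : List (List Int)) : List (List Bool) :=
  let d := (objs.getD 0 []).length
  objs.map fun p => objs.map fun q => pv_dominates d p q

-- one pass: fold over indices, carrying (ranks, current = indices assigned this pass)
def passB (n : Nat) (dom : List (List Bool)) (rank : Int) (st : List Int × List Nat) : List Int × List Nat :=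
  (List.range n).foldl
    (fun s i =>
      if decide (s.1.getD i 0 = -1) && !(s.2.any fun k => (dom.getD i []).getD k false) then
        (s.1.set i rank, s.2 ++ [i])
      else s)
    st

def loopB (n : Nat) (dom : List (List Bool)) : List Int → Int → Nat → List Int
  | ranks, _, 0 => ranks
  | ranks, rank, fuel + 1 =>
    if (-1 : Int) ∈ ranks then
      let s := passB n dom (rank + 1) (ranks, [])
      loopB n dom s.1 (rank + 1) fuel
    else ranks

def pareto_ranking_old_alt (objs : List (List Int)) : List Int :=
  let n := objs.length
  let dom := pv_domMatrix objs
  loopB n dom (List.replicate n (-1)) 0 n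

-- ===== PRECONDITION & SPEC =====
-- Pre_ excludes ragged inputs on which row 0 is longer than some other row: there the
-- j-loop over range(len(objs[0])) raises IndexError in Python A (and B raises likewise).
def Pre_pareto_ranking_old (objs : List (List Int)) : Prop :=
  ∀ o ∈ objs, (objs.getD 0 []).length ≤ o.length
instance (objs : List (List Int)) : Decidable (Pre_pareto_ranking_old objs) := by
  unfold Pre_pareto_ranking_old; infer_instance
def pvWitness_pareto_ranking_old : List (List Int) := [[1, 2], [0, 5], [1, 2]]

def Spec_pareto_ranking_old (objs : List (List Int)) (out : List Int) : Prop := out = pareto_ranking_old_alt objs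
instance (objs : List (List Int)) (out : List Int) : Decidable (Spec_pareto_ranking_old objs out) := by unfold Spec_pareto_ranking_old; infer_instance

-- ===== CLAIM (what is proved, stated in full; the proofs are below) =====
def Claim_equal_pareto_ranking_old : Prop := ∀ (objs : List (List Int)), Dom_pareto_ranking_old objs → Pre_pareto_ranking_old objs → Spec_pareto_ranking_old objs (pareto_ranking_old objs)

-- ===== LEMMAS AND PROOFS =====

-- the three counters of the inner j-loop are countP's
theorem kfold_aux (ov1 ov2 : List Int) (l : List Nat) (a b c : Int) :
    l.foldl (fun k j =>
      if is_better (ov1.getD j 0) (ov2.getD j 0) true then (k.1 + 1, k.2.1, k.2.2)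
      else if ov1.getD j 0 = ov2.getD j 0 then (k.1, k.2.1 + 1, k.2.2)
      else (k.1, k.2.1, k.2.2 + 1)) (a, b, c)
  = (a + l.countP (fun j => decide (ov1.getD j 0 < ov2.getD j 0)),
     b + l.countP (fun j => decide (¬ ov1.getD j 0 < ov2.getD j 0 ∧ ov1.getD j 0 = ov2.getD j 0)),
     c + l.countP (fun j => decide (¬ ov1.getD j 0 < ov2.getD j 0 ∧ ov1.getD j 0 ≠ ov2.getD j 0))) := by
  induction l generalizing a b c with
  | nil => simp
  | cons x xs ih =>
    simp only [List.foldl_cons]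
    have e1 := em (ov1.getD x 0 < ov2.getD x 0)
    have e2 := em (ov1.getD x 0 = ov2.getD x 0)
    rcases e1 with h1 | h1
    · rw [show (if is_better (ov1.getD x 0) (ov2.getD x 0) true then ((a : Int) + 1, b, c)
          else if ov1.getD x 0 = ov2.getD x 0 then (a, b + 1, c) else (a, b, c + 1))
          = (a + 1, b, c) from by
        simp only [is_better, if_true, decide_eq_true_eq]; rw [if_pos h1], ih]
      rw [List.countP_cons, List.countP_cons, List.countP_cons,
        show (decide (ov1.getD x 0 < ov2.getD x 0)) = true from decide_eq_true h1,
        show (decide (¬ov1.getD x 0 < ov2.getD x 0 ∧ ov1.getD x 0 = ov2.getD x 0)) = false from decide_eq_false (fun h => h.1 h1),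
        show (decide (¬ov1.getD x 0 < ov2.getD x 0 ∧ ov1.getD x 0 ≠ ov2.getD x 0)) = false from decide_eq_false (fun h => h.1 h1)]
      simp [Prod.ext_iff]
      omega
    · rcases e2 with h2 | h2
      · rw [show (if is_better (ov1.getD x 0) (ov2.getD x 0) true then ((a : Int) + 1, b, c)
            else if ov1.getD x 0 = ov2.getD x 0 then (a, b + 1, c) else (a, b, c + 1))
            = (a, b + 1, c) from by
          simp only [is_better, if_true, decide_eq_true_eq]; rw [if_neg h1, if_pos h2], ih]
        rw [List.countP_cons, List.countP_cons, List.countP_cons,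
          show (decide (ov1.getD x 0 < ov2.getD x 0)) = false from decide_eq_false h1,
          show (decide (¬ov1.getD x 0 < ov2.getD x 0 ∧ ov1.getD x 0 = ov2.getD x 0)) = true from decide_eq_true ⟨h1, h2⟩,
          show (decide (¬ov1.getD x 0 < ov2.getD x 0 ∧ ov1.getD x 0 ≠ ov2.getD x 0)) = false from decide_eq_false (fun h => h.2 h2)]
        simp [Prod.ext_iff]
        omega
      · rw [show (if is_better (ov1.getD x 0) (ov2.getD x 0) true then ((a : Int) + 1, b, c)
            else if ov1.getD x 0 = ov2.getD x 0 then (a, b + 1, c) else (a, b, c + 1))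
            = (a, b, c + 1) from by
          simp only [is_better, if_true, decide_eq_true_eq]; rw [if_neg h1, if_neg h2], ih]
        rw [List.countP_cons, List.countP_cons, List.countP_cons,
          show (decide (ov1.getD x 0 < ov2.getD x 0)) = false from decide_eq_false h1,
          show (decide (¬ov1.getD x 0 < ov2.getD x 0 ∧ ov1.getD x 0 = ov2.getD x 0)) = false from decide_eq_false (fun h => h2 h.2),
          show (decide (¬ov1.getD x 0 < ov2.getD x 0 ∧ ov1.getD x 0 ≠ ov2.getD x 0)) = true from decide_eq_true ⟨h1, h2⟩]
        simp [Prod.ext_iff]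
        omega

-- A's inner dominance test equals B's matrix entry
theorem cond_eq (objs : List (List Int)) (ov1 ov2 : List Int) :
    decide ((kCounts objs ov1 ov2 true).1 = 0 ∧ (kCounts objs ov1 ov2 true).2.2 > 0)
      = pv_dominates (objs.getD 0 []).length ov1 ov2 := by
  unfold kCounts
  rw [kfold_aux]
  simp only [zero_add]
  rw [Bool.eq_iff_iff]
  simp only [decide_eq_true_eq, pv_dominates, Bool.and_eq_true, List.all_eq_true,
    List.any_eq_true, List.mem_range, Nat.cast_eq_zero, List.countP_eq_zero, gt_iff_lt,
    Int.natCast_pos, List.countP_pos_iff, not_lt]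
  constructor
  · rintro ⟨hz, j, hj, h1, h2⟩
    exact ⟨hz, j, hj, by omega⟩
  · rintro ⟨hall, j, hj, hlt⟩
    exact ⟨hall, j, hj, by omega, by omega⟩

theorem domMatrix_get (objs : List (List Int)) (i k : Nat)
    (hi : i < objs.length) (hk : k < objs.length) :
    ((pv_domMatrix objs).getD i []).getD k false
      = pv_dominates (objs.getD 0 []).length (objs.getD i []) (objs.getD k []) := by
  simp [pv_domMatrix, hi, hk]

-- A's is_dominated, under the pass invariant, is B's scan of the current-pass list
theorem is_dominated_eq (objs : List (List Int)) (ranks : List Int) (curr : Int)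
    (cur : List Nat) (i : Nat)
    (hlen : ranks.length = objs.length)
    (hb : ∀ x ∈ ranks, x = -1 ∨ (1 ≤ x ∧ x ≤ curr))
    (hc : 1 ≤ curr)
    (hm : ∀ k, k < objs.length → (ranks.getD k 0 = curr ↔ k ∈ cur))
    (hcl : ∀ k ∈ cur, k < objs.length)
    (hi : ranks.getD i 0 = -1) :
    is_dominated objs i ranks curr true
      = cur.any (fun k => ((pv_domMatrix objs).getD i []).getD k false) := by
  have hin : i < objs.length := by
    by_contra h
    rw [List.getD_eq_default _ _ (by omega : ranks.length ≤ i)] at hi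
    exact absurd hi (by norm_num)
  rw [Bool.eq_iff_iff]
  unfold is_dominated
  simp only [List.any_eq_true, List.mem_range]
  constructor
  · rintro ⟨i', hi', hbody⟩
    by_cases hne : i' = i
    · rw [if_pos hne] at hbody
      exact absurd hbody (by simp)
    · rw [if_neg hne] at hbody
      by_cases hskip : ranks.getD i' 0 ≠ 0 ∧ ranks.getD i' 0 < curr
      · rw [if_pos hskip] at hbody
        exact absurd hbody (by simp)
      · rw [if_neg hskip] at hbody
        rw [cond_eq] at hbody
        have hmem : ranks.getD i' 0 ∈ ranks := by
          rw [List.getD_eq_getElem _ _ (by omega : i' < ranks.length)]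
          exact List.getElem_mem _
        have hcurr : ranks.getD i' 0 = curr := by
          rcases hb _ hmem with h | h <;> omega
        exact ⟨i', (hm i' hi').mp hcurr,
          by rw [domMatrix_get objs i i' hin hi']; exact hbody⟩
  · rintro ⟨k, hkc, hdom⟩
    have hkn := hcl k hkc
    have hkcurr : ranks.getD k 0 = curr := (hm k hkn).mpr hkc
    have hki : k ≠ i := by
      intro e
      rw [e, hi] at hkcurr
      omega
    refine ⟨k, hkn, ?_⟩
    rw [if_neg hki, if_neg (by omega : ¬(ranks.getD k 0 ≠ 0 ∧ ranks.getD k 0 < curr)), cond_eq]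
    rw [domMatrix_get objs i k hin hkn] at hdom
    exact hdom

-- the joint invariant carried through one pass
def PRel (n : Nat) (curr : Int) (sA : List Int × Int) (sB : List Int × List Nat) : Prop :=
  sA.1 = sB.1 ∧ sA.1.length = n ∧
  sA.2 = (sA.1.countP (fun x => decide (x = -1)) : Int) ∧
  (∀ x ∈ sA.1, x = -1 ∨ (1 ≤ x ∧ x ≤ curr)) ∧
  (∀ k, k < n → (sA.1.getD k 0 = curr ↔ k ∈ sB.2)) ∧
  (∀ k ∈ sB.2, k < n)

theorem countP_set (p : Int → Bool) (l : List Int) (i : Nat) (a : Int) (h : i < l.length) :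
    ((l.set i a).countP p : Int) + (if p l[i] then 1 else 0)
      = (l.countP p : Int) + (if p a then 1 else 0) := by
  rw [List.countP_set h]
  by_cases hp : p l[i]
  · have h1 : 0 < l.countP p := List.countP_pos_iff.mpr ⟨l[i], List.getElem_mem h, hp⟩
    by_cases hpa : p a
    · simp [hp, hpa]
      omega
    · simp [hp, hpa]
      omega
  · by_cases hpa : p a
    · simp [hp, hpa]
    · simp [hp, hpa]

theorem step_rel (objs : List (List Int)) (curr : Int) (hc : 1 ≤ curr)
    (sA : List Int × Int) (sB : List Int × List Nat) (i : Nat)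
    (hi : i < objs.length) (hrel : PRel objs.length curr sA sB) :
    PRel objs.length curr
      (if sA.1.getD i 0 > 0 then sA
       else if is_dominated objs i sA.1 curr true then sA
       else (sA.1.set i curr, sA.2 - 1))
      (if decide (sB.1.getD i 0 = -1) &&
          !(sB.2.any fun k => ((pv_domMatrix objs).getD i []).getD k false) then
         (sB.1.set i curr, sB.2 ++ [i])
       else sB) := by
  obtain ⟨rA, rem⟩ := sA
  obtain ⟨rB, cur⟩ := sB
  obtain ⟨heq, hlen, hcnt, hb, hm, hcl⟩ := hrel
  simp only at heq hlen hcnt hb hm hcl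
  subst heq
  unfold PRel
  dsimp only
  by_cases hx : rA.getD i 0 > 0
  · rw [if_pos hx,
      if_neg (by rw [decide_eq_false (show ¬(rA.getD i 0 = -1) by omega)]; simp)]
    exact ⟨rfl, hlen, hcnt, hb, hm, hcl⟩
  · have hx' : rA.getD i 0 = -1 := by
      have hmem : rA.getD i 0 ∈ rA := by
        rw [List.getD_eq_getElem _ _ (by omega : i < rA.length)]
        exact List.getElem_mem _
      rcases hb _ hmem with h | h
      · exact h
      · omega
    rw [if_neg hx]
    have hdom := is_dominated_eq objs rA curr cur i hlen hb hc hm hcl hx'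
    by_cases hany : cur.any (fun k => ((pv_domMatrix objs).getD i []).getD k false) = true
    · rw [if_pos (by rw [hdom]; exact hany), if_neg (by rw [hany]; simp)]
      exact ⟨rfl, hlen, hcnt, hb, hm, hcl⟩
    · have hanyf : (cur.any fun k => ((pv_domMatrix objs).getD i []).getD k false) = false := by
        cases h : (cur.any fun k => ((pv_domMatrix objs).getD i []).getD k false)
        · rfl
        · exact absurd h hany
      rw [if_neg (by rw [hdom]; exact hany), if_pos (by rw [hx', hanyf]; simp)]
      dsimp only
      have hgi : rA[i] = -1 := by
        rw [List.getD_eq_getElem _ _ (by omega : i < rA.length)] at hx'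
        exact hx'
      refine ⟨rfl, by simp [hlen], ?_, ?_, ?_, ?_⟩
      · have := countP_set (fun x => decide (x = -1)) rA i curr (by omega)
        rw [hgi] at this
        simp only [decide_true, if_pos] at this
        have hcne : (decide (curr = -1)) = false := decide_eq_false (by omega)
        rw [hcne] at this
        simp at this
        omega
      · intro x hx2
        rcases List.mem_or_eq_of_mem_set hx2 with h | h
        · exact hb _ h
        · subst h
          right
          exact ⟨hc, le_refl _⟩
      · intro k hk
        by_cases hki : k = i
        · subst hki
          rw [List.getD_eq_getElem _ _ (by simp; omega), List.getElem_set_self]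
          simp
        · rw [List.getD_eq_getElem _ _ (by simp; omega),
            List.getElem_set_ne (by omega : i ≠ k), ← List.getD_eq_getElem _ _ (by omega : k < rA.length)]
          rw [hm k hk]
          simp [hki]
      · intro k hk
        rcases List.mem_append.mp hk with h | h
        · exact hcl _ h
        · simp at h
          subst h
          omega

theorem fold_rel (objs : List (List Int)) (curr : Int) (hc : 1 ≤ curr) (l : List Nat)
    (hl : ∀ i ∈ l, i < objs.length) :
    ∀ (sA : List Int × Int) (sB : List Int × List Nat), PRel objs.length curr sA sB →
    PRel objs.length curr
      (l.foldl (fun s i =>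
        if s.1.getD i 0 > 0 then s
        else if is_dominated objs i s.1 curr true then s
        else (s.1.set i curr, s.2 - 1)) sA)
      (l.foldl (fun s i =>
        if decide (s.1.getD i 0 = -1) &&
            !(s.2.any fun k => ((pv_domMatrix objs).getD i []).getD k false) then
          (s.1.set i curr, s.2 ++ [i])
        else s) sB) := by
  induction l with
  | nil => intro sA sB h; exact h
  | cons x xs ih =>
    intro sA sB h
    exact ih (fun i hi => hl i (List.mem_cons_of_mem _ hi)) _ _
      (step_rel objs curr hc sA sB x (hl x (List.mem_cons_self)) h)

theorem loop_eq (objs : List (List Int)) : ∀ (fuel : Nat) (r : List Int) (curr rem : Int),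
    0 ≤ curr → r.length = objs.length →
    rem = (r.countP (fun x => decide (x = -1)) : Int) →
    (∀ x ∈ r, x = -1 ∨ (1 ≤ x ∧ x ≤ curr)) →
    loopA objs r curr rem fuel = loopB objs.length (pv_domMatrix objs) r curr fuel := by
  intro fuel
  induction fuel with
  | zero => intro r curr rem _ _ _ _; rfl
  | succ f ih =>
    intro r curr rem hc hlen hcnt hb
    have hiff : rem > 0 ↔ (-1 : Int) ∈ r := by
      subst hcnt
      constructor
      · intro h
        have h0 : 0 < r.countP (fun x => decide (x = -1)) := by exact_mod_cast h
        rcases List.countP_pos_iff.mp h0 with ⟨x, hx, hpx⟩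
        simp only [decide_eq_true_eq] at hpx
        rw [← hpx]
        exact hx
      · intro h
        have h0 : 0 < r.countP (fun x => decide (x = -1)) :=
          List.countP_pos_iff.mpr ⟨-1, h, by simp⟩
        exact_mod_cast h0
    simp only [loopA, loopB]
    by_cases hrem : rem > 0
    · rw [if_pos hrem, if_pos (hiff.mp hrem)]
      have hrel0 : PRel objs.length (curr + 1) (r, rem) (r, []) := by
        unfold PRel
        dsimp only
        refine ⟨rfl, hlen, hcnt, ?_, ?_, ?_⟩
        · intro x hx
          rcases hb x hx with h | h
          · exact Or.inl h
          · exact Or.inr ⟨h.1, by omega⟩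
        · intro k hk
          constructor
          · intro hek
            exfalso
            have hmem : r.getD k 0 ∈ r := by
              rw [List.getD_eq_getElem _ _ (by omega : k < r.length)]
              exact List.getElem_mem _
            rcases hb _ hmem with h | h <;> omega
          · intro h0
            exact absurd h0 (List.not_mem_nil)
        · intro k hk
          exact absurd hk (List.not_mem_nil)
      have hrel : PRel objs.length (curr + 1)
          (passA objs (curr + 1) (r, rem))
          (passB objs.length (pv_domMatrix objs) (curr + 1) (r, [])) :=
        fold_rel objs (curr + 1) (by omega) (List.range objs.length)
          (by simp) _ _ hrel0
      obtain ⟨heq, hlen', hcnt', hb', _, _⟩ := hrel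
      rw [ih _ _ _ (by omega) hlen' hcnt' hb', heq]
    · rw [if_neg hrem, if_neg (fun h => hrem (hiff.mpr h))]

-- ===== VERDICT (by name: the statement is the Claim_ definition above) =====
theorem pareto_ranking_old_spec : Claim_equal_pareto_ranking_old := by
  intro objs _ _
  unfold Spec_pareto_ranking_old pareto_ranking_old pareto_ranking_old_alt
  exact loop_eq objs objs.length (List.replicate objs.length (-1)) 0 objs.length
    le_rfl (by simp) (by simp [List.countP_replicate])
    (by intro x hx; left; exact (List.eq_of_mem_replicate hx))
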